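-- pv_equiv track=rewrite | github.com/kvwillian/clean-code-bot | examples/after/sample.py | weighted_nested_sum
-- ===== SOURCE A (Python) =====
-- from collections.abc import Iterable, Mapping, Sequence
--
-- def weighted_nested_sum(
--     a: Sequence[int],
--     b: Sequence[int],
--     c: Sequence[int],
--     d: Mapping[str, int] | None,
--     e: Sequence[int],
--     f: Sequence[int],
-- ) -> int:
--     """
--     Compute a weighted sum using parallel sequences.
--
--     The original implementation mixed indexing styles and implicit length
--     assumptions; this version uses explicit bounds and clearer structure.
--
--     Args:
--         a: Primary left multiplicand sequence.
--         b: Sequence paired with ``a`` for products.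
--         c: Modulo-weight sequence aligned with ``a`` indices.
--         d: Optional map keyed by stringified ``b`` indices.
--         e: Sequence scaled into ``tmp`` contributions.
--         f: Parallel sequence to ``e`` for pairwise combination.
--
--     Returns:
--         Combined scalar result.
--     """
--     total = 0
--     len_a, len_b = len(a), len(b)
--     len_c = len(c)
--
--     for i in range(len_a):
--         for j in range(len_b):
--             c_part = c[i % len_c] if len_c else 0
--             total += a[i] * b[j] + c_part
--             if d is not None:
--                 total += d.get(str(j), 0)
--
--     tmp: list[int] = []
--     len_e, len_f = len(e), len(f)
--     for k in range(len_e):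
--         if k < len_f:
--             tmp.append(e[k] * 2 + f[k])
--         else:
--             tmp.append(e[k])
--
--     return total + sum(tmp)
-- ===== SOURCE B (Python) =====
-- def weighted_nested_sum(a, b, c, d, e, f):
--     la, lb, lc = len(a), len(b), len(c)
--     if lc:
--         q, r = divmod(la, lc)
--         csum = q * sum(c) + sum(c[:r])
--     else:
--         csum = 0
--     total = sum(a) * sum(b) + lb * csum
--     if d is not None:
--         total += la * sum(d.get(str(j), 0) for j in range(lb))
--     m = min(len(e), len(f))
--     return total + sum(e) + sum(e[:m]) + sum(f[:m])
-- ===== Notes on version B (the rewrite author's own statement) =====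
-- stated objective: faster
-- what changed: B replaces A's nested O(len_a*len_b) accumulation loop by the closed form sum(a)*sum(b) + len_b*(cyclic c-sum via divmod) + len_a*(dict contributions over range(len_b)), and the tmp list by direct prefix sums of e and f.
import Mathlib
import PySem

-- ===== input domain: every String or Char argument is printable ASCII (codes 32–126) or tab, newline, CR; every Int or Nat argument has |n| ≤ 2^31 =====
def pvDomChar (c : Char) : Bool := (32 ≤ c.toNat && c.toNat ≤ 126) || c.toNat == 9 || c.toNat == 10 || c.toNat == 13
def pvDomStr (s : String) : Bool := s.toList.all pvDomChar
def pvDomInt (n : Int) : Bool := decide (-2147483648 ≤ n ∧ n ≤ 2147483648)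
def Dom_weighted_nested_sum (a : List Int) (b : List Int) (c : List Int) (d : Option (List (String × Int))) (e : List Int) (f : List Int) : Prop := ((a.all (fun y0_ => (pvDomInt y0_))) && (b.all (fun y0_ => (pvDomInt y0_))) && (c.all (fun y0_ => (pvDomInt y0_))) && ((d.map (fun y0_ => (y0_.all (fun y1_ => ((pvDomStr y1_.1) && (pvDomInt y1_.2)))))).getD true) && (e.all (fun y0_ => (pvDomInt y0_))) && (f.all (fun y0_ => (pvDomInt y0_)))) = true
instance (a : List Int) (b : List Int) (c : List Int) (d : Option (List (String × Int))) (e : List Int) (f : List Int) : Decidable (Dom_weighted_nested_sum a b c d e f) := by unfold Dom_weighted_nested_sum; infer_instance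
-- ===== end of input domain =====

-- ===== PORT A =====
-- B replaces A's nested O(|a|*|b|) accumulation loop by closed-form sums (objective: faster, asymptotic).
def weighted_nested_sum (a : List Int) (b : List Int) (c : List Int) (d : Option (List (String × Int))) (e : List Int) (f : List Int) : Int :=
  -- literal port of A: nested index loops over range(len_a) × range(len_b), then the tmp list loop
  let lenA := a.length
  let lenB := b.length
  let lenC := c.length
  let total : Int := (List.range lenA).foldl (fun total i =>
    (List.range lenB).foldl (fun total j =>
      let cPart : Int := if lenC ≠ 0 then c.getD (i % lenC) 0 else 0
      let total := total + a.getD i 0 * b.getD j 0 + cPart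
      match d with
      | some dm => total + (PySem.Dict.mk dm).getD (PySem.Int.toStr (j : Int)) 0
      | none => total) total) 0
  let tmp : List Int := (List.range e.length).foldl (fun tmp k =>
    if k < f.length then tmp ++ [e.getD k 0 * 2 + f.getD k 0]
    else tmp ++ [e.getD k 0]) []
  total + tmp.sum

-- ===== PORT B =====
def weighted_nested_sum_alt (a : List Int) (b : List Int) (c : List Int) (d : Option (List (String × Int))) (e : List Int) (f : List Int) : Int :=
  let la := a.length
  let lb := b.length
  let lc := c.length
  let csum : Int := if lc ≠ 0 then ((la / lc : Nat) : Int) * c.sum + (c.take (la % lc)).sum else 0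
  let total : Int := a.sum * b.sum + (lb : Int) * csum
  let total : Int := match d with
    | some dm => total + (la : Int) * ((List.range lb).map (fun j : Nat => (PySem.Dict.mk dm).getD (PySem.Int.toStr (j : Int)) 0)).sum
    | none => total
  let m := min e.length f.length
  total + e.sum + (e.take m).sum + (f.take m).sum

-- ===== PRECONDITION & SPEC =====
def Spec_weighted_nested_sum (a : List Int) (b : List Int) (c : List Int) (d : Option (List (String × Int))) (e : List Int) (f : List Int) (out : Int) : Prop := out = weighted_nested_sum_alt a b c d e f
instance (a : List Int) (b : List Int) (c : List Int) (d : Option (List (String × Int))) (e : List Int) (f : List Int) (out : Int) : Decidable (Spec_weighted_nested_sum a b c d e f out) := by unfold Spec_weighted_nested_sum; infer_instance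

-- ===== CLAIM (what is proved, stated in full; the proofs are below) =====
def Claim_equal_weighted_nested_sum : Prop := ∀ (a : List Int) (b : List Int) (c : List Int) (d : Option (List (String × Int))) (e : List Int) (f : List Int), Dom_weighted_nested_sum a b c d e f → Spec_weighted_nested_sum a b c d e f (weighted_nested_sum a b c d e f)

-- ===== LEMMAS AND PROOFS =====

-- sum of a take extended by one element
theorem sum_take_getD (l : List Int) (k : Nat) (h : k < l.length) :
    (l.take (k+1)).sum = (l.take k).sum + l.getD k 0 := by
  rw [← List.take_concat_get' l k h, List.sum_append]
  simp [List.getD, List.getElem?_eq_getElem h]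

-- (range l.length).map getD recovers the list itself
theorem map_getD_range (l : List Int) : (List.range l.length).map (fun i => l.getD i 0) = l := by
  apply List.ext_getElem (by simp)
  intro i h1 h2
  simp [List.getD_eq_getElem?_getD, List.getElem?_eq_getElem h2]

-- closed form for the cyclic c-part sum
theorem sum_mod_range (c : List Int) (h : c.length ≠ 0) (n : Nat) :
    ((List.range n).map (fun i => c.getD (i % c.length) 0)).sum
      = ((n / c.length : Nat) : Int) * c.sum + (c.take (n % c.length)).sum := by
  induction n with
  | zero => simp
  | succ n ih =>
    rw [List.range_succ, List.map_append, List.sum_append, ih]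
    simp only [List.map_cons, List.map_nil, List.sum_cons, List.sum_nil, add_zero]
    have hpos : 0 < c.length := Nat.pos_of_ne_zero h
    have hr : n % c.length < c.length := Nat.mod_lt _ hpos
    have h1 := Nat.div_add_mod n c.length
    by_cases hcase : n % c.length + 1 = c.length
    · have huniq := (Nat.div_mod_unique hpos (a := n+1) (d := n / c.length + 1) (c := 0)).mpr
        (by constructor
            · rw [Nat.mul_add, Nat.mul_one]; omega
            · exact hpos)
      have htake : (c.take (n % c.length + 1)).sum = (c.take (n % c.length)).sum + c.getD (n % c.length) 0 :=
        sum_take_getD c _ hr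
      rw [hcase, List.take_length] at htake
      rw [huniq.1, huniq.2]
      simp only [List.take_zero, List.sum_nil, add_zero, Nat.cast_add, Nat.cast_one]
      linarith [htake]
    · have huniq := (Nat.div_mod_unique hpos (a := n+1) (d := n / c.length) (c := n % c.length + 1)).mpr
        (by omega)
      rw [huniq.1, huniq.2, sum_take_getD c _ hr]
      ring

-- closed form for the tmp-list sum
theorem tmp_sum (e f : List Int) (n : Nat) (hn : n ≤ e.length) :
    ((List.range n).map (fun k => if k < f.length then e.getD k 0 * 2 + f.getD k 0 else e.getD k 0)).sum
      = (e.take n).sum + (e.take (min n f.length)).sum + (f.take (min n f.length)).sum := by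
  induction n with
  | zero => simp
  | succ n ih =>
    have hn' : n ≤ e.length := Nat.le_of_succ_le hn
    have hne : n < e.length := hn
    rw [List.range_succ, List.map_append, List.sum_append, ih hn']
    simp only [List.map_cons, List.map_nil, List.sum_cons, List.sum_nil, add_zero]
    by_cases hf : n < f.length
    · have h1 : min (n+1) f.length = n + 1 := by omega
      have h2 : min n f.length = n := by omega
      rw [if_pos hf, h1, h2, sum_take_getD e n hne, sum_take_getD f n hf]
      ring
    · have h1 : min (n+1) f.length = min n f.length := by omega
      rw [if_neg hf, h1, sum_take_getD e n hne]
      ring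

-- the inner j-loop of A, in closed form (dg is the dict contribution; 0-function when d is None)
theorem inner_loop (a b c : List Int) (dg : Nat → Int) (i : Nat) (t : Int) :
    (List.range b.length).foldl (fun total j =>
        total + a.getD i 0 * b.getD j 0 + (if c.length ≠ 0 then c.getD (i % c.length) 0 else 0) + dg j) t
      = t + (a.getD i 0 * b.sum
          + ((b.length : Int) * (if c.length ≠ 0 then c.getD (i % c.length) 0 else 0)
             + ((List.range b.length).map dg).sum)) := by
  have hb : (fun (total : Int) j =>
      total + a.getD i 0 * b.getD j 0 + (if c.length ≠ 0 then c.getD (i % c.length) 0 else 0) + dg j)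
      = fun total j => total + (a.getD i 0 * b.getD j 0
          + ((if c.length ≠ 0 then c.getD (i % c.length) 0 else 0) + dg j)) := by
    funext total j; ring
  rw [hb, PySem.List.foldl_add, PySem.List.sum_map_add_int, PySem.List.sum_map_add_int,
      PySem.List.sum_map_const_int, List.sum_map_mul_left, map_getD_range b, List.length_range]

-- the whole double loop of A, in closed form
theorem outer_loop (a b c : List Int) (dg : Nat → Int) :
    (List.range a.length).foldl (fun total i =>
        (List.range b.length).foldl (fun total j =>
          total + a.getD i 0 * b.getD j 0 + (if c.length ≠ 0 then c.getD (i % c.length) 0 else 0) + dg j) total) 0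
      = a.sum * b.sum
        + (b.length : Int) * ((List.range a.length).map (fun i => if c.length ≠ 0 then c.getD (i % c.length) 0 else 0)).sum
        + (a.length : Int) * ((List.range b.length).map dg).sum := by
  have hfun : (fun (total : Int) i =>
      (List.range b.length).foldl (fun total j =>
        total + a.getD i 0 * b.getD j 0 + (if c.length ≠ 0 then c.getD (i % c.length) 0 else 0) + dg j) total)
      = fun total i => total + (a.getD i 0 * b.sum
          + ((b.length : Int) * (if c.length ≠ 0 then c.getD (i % c.length) 0 else 0)
             + ((List.range b.length).map dg).sum)) := by
    funext total i; exact inner_loop a b c dg i total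
  rw [hfun, PySem.List.foldl_add, PySem.List.sum_map_add_int, PySem.List.sum_map_add_int,
      PySem.List.sum_map_const_int, List.sum_map_mul_right, map_getD_range a, List.length_range,
      List.sum_map_mul_left]
  ring

-- the c-part sum agrees with B's csum in both cases
theorem cpart_sum (a c : List Int) :
    ((List.range a.length).map (fun i => if c.length ≠ 0 then c.getD (i % c.length) 0 else 0)).sum
      = (if c.length ≠ 0 then ((a.length / c.length : Nat) : Int) * c.sum + (c.take (a.length % c.length)).sum else 0) := by
  by_cases hc : c.length ≠ 0
  · simp only [if_pos hc]
    rw [← sum_mod_range c hc a.length]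
  · simp [hc]

-- A's tmp list is a map over range(len_e)
theorem tmp_list (e f : List Int) :
    ((List.range e.length).foldl (fun tmp k =>
        if k < f.length then tmp ++ [e.getD k 0 * 2 + f.getD k 0] else tmp ++ [e.getD k 0]) ([] : List Int)).sum
      = (e.take e.length).sum + (e.take (min e.length f.length)).sum + (f.take (min e.length f.length)).sum := by
  have hfun : (fun (tmp : List Int) k =>
      if k < f.length then tmp ++ [e.getD k 0 * 2 + f.getD k 0] else tmp ++ [e.getD k 0])
      = fun tmp k => tmp ++ [if k < f.length then e.getD k 0 * 2 + f.getD k 0 else e.getD k 0] := by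
    funext tmp k; split <;> rfl
  rw [hfun, PySem.List.foldl_append_singleton_eq_map, List.nil_append]
  exact tmp_sum e f e.length le_rfl

-- ===== VERDICT (by name: the statement is the Claim_ definition above) =====
theorem weighted_nested_sum_spec : Claim_equal_weighted_nested_sum := by
  intro a b c d e f _
  show weighted_nested_sum a b c d e f = weighted_nested_sum_alt a b c d e f
  rcases d with _ | dm
  · simp only [weighted_nested_sum, weighted_nested_sum_alt]
    have h := outer_loop a b c (fun _ => 0)
    have hz : ((List.range b.length).map (fun _ => (0 : Int))).sum = 0 := by simp
    rw [hz, mul_zero, add_zero] at h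
    simp only [add_zero] at h
    rw [h, tmp_list e f, cpart_sum a c, List.take_length]
    ring
  · simp only [weighted_nested_sum, weighted_nested_sum_alt]
    have h := outer_loop a b c (fun j => (PySem.Dict.mk dm).getD (PySem.Int.toStr (j : Int)) 0)
    rw [h, tmp_list e f, cpart_sum a c, List.take_length]
    ring
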